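-- pv_equiv track=rewrite | github.com/Classicalqy/Introduction-to-Computation | 计算概论大作业/strategy.py | turtle
-- ===== SOURCE A (Python) =====
-- def f1(p,w):#截取序列
--         p1=[]
--         l=len(p)
--         if l<w:
--             p1=p
--         else:
--             p1=p[l-w:l]
--         return p1
--
-- def turtle(price, w):
--     ans=[0]
--     for i in range (1,len(price)):
--         a=f1(price[0:i+1],w)
--         maxn=a[0]
--         minn=a[0]
--         for j in range(0,len(a)-1):#算出区间最大值和最小值
--             maxn=max(maxn,a[j])
--             minn=min(minn,a[j])
--         if a[len(a)-1]>maxn: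
--             ans.append(-1)
--         elif a[len(a)-1]<minn:
--             ans.append(1)
--         else:
--             ans.append(0)
--     return ans
-- ===== SOURCE B (Python) =====
-- def _push(stack, v):
--     # push v on a stack whose entries cache (value, max-of-stack, min-of-stack)
--     if stack:
--         _, hi, lo = stack[-1]
--         stack.append((v, v if v > hi else hi, v if v < lo else lo))
--     else:
--         stack.append((v, v, v))
--
-- def turtle(price, w):
--     # Amortized O(1) per step: a two-stack FIFO queue holding the previous
--     # min(i, w-1) prices, each stack entry caching its running max/min.
--     ans = [0]
--     back = []   # newest on top
--     front = []  # oldest on top (popped from here)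
--     for i in range(1, len(price)):
--         _push(back, price[i - 1])
--         if len(back) + len(front) > w - 1:
--             if not front:
--                 while back:
--                     _push(front, back.pop()[0])
--             front.pop()
--         cur = price[i]
--         if not back and not front:
--             ans.append(0)
--         else:
--             if back and front:
--                 hi = max(back[-1][1], front[-1][1])
--                 lo = min(back[-1][2], front[-1][2])
--             elif back:
--                 hi, lo = back[-1][1], back[-1][2]
--             else:
--                 hi, lo = front[-1][1], front[-1][2]
--             ans.append(-1 if cur > hi else (1 if cur < lo else 0))
--     return ans
-- ===== Notes on version B (the rewrite author's own statement) =====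
-- stated objective: faster
-- what changed: Replaces the per-index window re-slice and O(w) max/min rescan with a two-stack FIFO queue whose entries cache running max/min, updating the window extremes in amortized O(1) per element.
-- crash fix: On inputs with len(price) >= 2 and w <= 0, A raises IndexError (the truncated window slice is empty and a[0] fails); B returns [0]*len(price) since the window of previous prices is always empty. — e.g. on turtle([1, 2], 0): A raises IndexError, B returns [0, 0]
import Mathlib
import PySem

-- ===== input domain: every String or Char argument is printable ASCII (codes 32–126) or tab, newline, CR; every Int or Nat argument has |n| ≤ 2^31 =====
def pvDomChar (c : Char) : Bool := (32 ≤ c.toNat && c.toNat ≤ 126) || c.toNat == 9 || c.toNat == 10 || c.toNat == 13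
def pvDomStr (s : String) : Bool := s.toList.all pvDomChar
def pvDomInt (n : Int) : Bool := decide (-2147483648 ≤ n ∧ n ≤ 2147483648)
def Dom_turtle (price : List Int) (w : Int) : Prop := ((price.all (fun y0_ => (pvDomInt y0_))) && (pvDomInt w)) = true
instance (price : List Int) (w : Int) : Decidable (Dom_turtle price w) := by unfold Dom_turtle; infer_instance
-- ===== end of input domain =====

-- B replaces A's per-index window re-slice and O(w) max/min rescan by a two-stack FIFO queue
-- with cached running max/min (amortized O(1) per element); proved equal wherever A returns.


-- ===== PORT A =====
def f1 (p : List Int) (w : Int) : List Int :=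
  let l : Int := p.length
  if l < w then p else PySem.List.slice p (some (l - w)) (some l)

def turtle (price : List Int) (w : Int) : List Int :=
  (PySem.List.pyRange 1 (price.length : Int) 1).foldl (fun ans i =>
    let a := f1 (PySem.List.slice price (some 0) (some (i + 1))) w
    let a0 := PySem.List.pyGetD a 0 0
    let mm := (PySem.List.pyRange 0 ((a.length : Int) - 1) 1).foldl
      (fun (mm : Int × Int) j =>
        (max mm.1 (PySem.List.pyGetD a j 0), min mm.2 (PySem.List.pyGetD a j 0))) (a0, a0)
    let last := PySem.List.pyGetD a ((a.length : Int) - 1) 0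
    if last > mm.1 then ans ++ [-1]
    else if last < mm.2 then ans ++ [1]
    else ans ++ [0]) [0]

-- ===== PORT B =====
-- a Python list used as a stack is a Lean list with its HEAD as the stack top (= Python's end)
def pvPush (x : Int) (st : List (Int × Int × Int)) : List (Int × Int × Int) :=
  match st with
  | [] => [(x, x, x)]
  | (_, hi, lo) :: _ => (x, if x > hi then x else hi, if x < lo then x else lo) :: st

-- the 'while back: _push(front, back.pop()[0])' loop
def pvFlip (back front : List (Int × Int × Int)) : List (Int × Int × Int) :=
  match back with
  | [] => front
  | (v, _, _) :: rest => pvFlip rest (pvPush v front)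

def pvStep (price : List Int) (w : Int)
    (st : List Int × List (Int × Int × Int) × List (Int × Int × Int)) (i : Int) :
    List Int × List (Int × Int × Int) × List (Int × Int × Int) :=
  let back := pvPush (PySem.List.pyGetD price (i - 1) 0) st.2.1
  let bf :=
    if (back.length : Int) + (st.2.2.length : Int) > w - 1 then
      let front := if st.2.2 = [] then pvFlip back [] else st.2.2
      let back := if st.2.2 = [] then [] else back
      (back, front.tail)            -- front.pop(); front is nonempty here
    else (back, st.2.2)
  let cur := PySem.List.pyGetD price i 0
  if bf.1 = [] ∧ bf.2 = [] then (st.1 ++ [0], bf)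
  else
    let hl :=
      if bf.1 ≠ [] ∧ bf.2 ≠ [] then
        (max (bf.1.headD (0,0,0)).2.1 (bf.2.headD (0,0,0)).2.1,
         min (bf.1.headD (0,0,0)).2.2 (bf.2.headD (0,0,0)).2.2)
      else if bf.1 ≠ [] then ((bf.1.headD (0,0,0)).2.1, (bf.1.headD (0,0,0)).2.2)
      else ((bf.2.headD (0,0,0)).2.1, (bf.2.headD (0,0,0)).2.2)
    (st.1 ++ [if cur > hl.1 then -1 else if cur < hl.2 then 1 else 0], bf)

def turtle_alt (price : List Int) (w : Int) : List Int :=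
  ((PySem.List.pyRange 1 (price.length : Int) 1).foldl (pvStep price w) ([0], [], [])).1

-- ===== PRECONDITION & SPEC =====
-- Pre_ excludes exactly the inputs on which A raises IndexError: len(price) ≥ 2 with w ≤ 0
-- (the truncated window slice is empty and a[0] fails).
def Pre_turtle (price : List Int) (w : Int) : Prop := price.length ≤ 1 ∨ 1 ≤ w
instance (price : List Int) (w : Int) : Decidable (Pre_turtle price w) := by unfold Pre_turtle; infer_instance
def pvWitness_turtle : List Int × Int := ([3, 1, 4, 1, 5], 3)

-- On inputs with len(price) ≥ 2 and w ≤ 0, A raises IndexError; B returns a list of zeros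
-- (the window of previous prices is always empty, so no signal fires); checked by turtle_raises below.
def Raises_turtle (price : List Int) (w : Int) : Prop := 2 ≤ price.length ∧ w ≤ 0
instance (price : List Int) (w : Int) : Decidable (Raises_turtle price w) := by unfold Raises_turtle; infer_instance
def pvRaiseWitness_turtle : List Int × Int := ([1, 2], 0)
def pvRaiseWitnessOut_turtle : List Int := [0, 0]

def Spec_turtle (price : List Int) (w : Int) (out : List Int) : Prop := out = turtle_alt price w
instance (price : List Int) (w : Int) (out : List Int) : Decidable (Spec_turtle price w out) := by unfold Spec_turtle; infer_instance

-- ===== CLAIM (what is proved, stated in full; the proofs are below) =====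
def Claim_equal_turtle : Prop := ∀ (price : List Int) (w : Int), Dom_turtle price w → Pre_turtle price w → Spec_turtle price w (turtle price w)
def Claim_raises_turtle : Prop := (∀ (price : List Int) (w : Int), Dom_turtle price w → Raises_turtle price w → ¬ Pre_turtle price w) ∧ (Dom_turtle (pvRaiseWitness_turtle.1) (pvRaiseWitness_turtle.2) ∧ Raises_turtle (pvRaiseWitness_turtle.1) (pvRaiseWitness_turtle.2) ∧ turtle_alt (pvRaiseWitness_turtle.1) (pvRaiseWitness_turtle.2) = pvRaiseWitnessOut_turtle)

-- ===== LEMMAS AND PROOFS =====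

def pvM : List Int → Int | [] => 0 | y :: ys => ys.foldl max y
def pvm : List Int → Int | [] => 0 | y :: ys => ys.foldl min y
theorem pvM_shift (l : List Int) (a b : Int) : l.foldl max (max a b) = max a (l.foldl max b) :=
  List.foldl_assoc
theorem pvm_shift (l : List Int) (a b : Int) : l.foldl min (min a b) = min a (l.foldl min b) :=
  List.foldl_assoc
theorem pvM_append (l1 l2 : List Int) (h1 : l1 ≠ []) (h2 : l2 ≠ []) :
    pvM (l1 ++ l2) = max (pvM l1) (pvM l2) := by
  cases l1 with
  | nil => simp at h1
  | cons y1 t1 =>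
    cases l2 with
    | nil => simp at h2
    | cons y2 t2 => simp [pvM, List.foldl_append, List.foldl_cons, pvM_shift]
theorem pvm_append (l1 l2 : List Int) (h1 : l1 ≠ []) (h2 : l2 ≠ []) :
    pvm (l1 ++ l2) = min (pvm l1) (pvm l2) := by
  cases l1 with
  | nil => simp at h1
  | cons y1 t1 =>
    cases l2 with
    | nil => simp at h2
    | cons y2 t2 => simp [pvm, List.foldl_append, List.foldl_cons, pvm_shift]
theorem pvM_perm (l1 l2 : List Int) (h : l1.Perm l2) : pvM l1 = pvM l2 := by
  cases l1 with
  | nil => simp [h.nil_eq.symm]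
  | cons y1 t1 =>
    cases l2 with
    | nil => exact absurd h.symm.nil_eq (by simp)
    | cons y2 t2 =>
      have e1 : (y1 :: t1).foldl max y1 = pvM (y1 :: t1) := by
        simp [pvM, List.foldl_cons]
      have e2 : (y2 :: t2).foldl max y1 = max y1 (pvM (y2 :: t2)) := by
        simp [pvM, List.foldl_cons, ← pvM_shift]
      have e3 : (y2 :: t2).foldl max y2 = pvM (y2 :: t2) := by
        simp [pvM, List.foldl_cons]
      have e4 : (y1 :: t1).foldl max y2 = max y2 (pvM (y1 :: t1)) := by
        simp [pvM, List.foldl_cons, ← pvM_shift]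
      have q1 := List.Perm.foldl_op_eq (op := (max : Int → Int → Int)) (a := y1) h
      have q2 := List.Perm.foldl_op_eq (op := (max : Int → Int → Int)) (a := y2) h.symm
      rw [e1, e2] at q1
      rw [e3, e4] at q2
      omega
theorem pvm_perm (l1 l2 : List Int) (h : l1.Perm l2) : pvm l1 = pvm l2 := by
  cases l1 with
  | nil => simp [h.nil_eq.symm]
  | cons y1 t1 =>
    cases l2 with
    | nil => exact absurd h.symm.nil_eq (by simp)
    | cons y2 t2 =>
      have e1 : (y1 :: t1).foldl min y1 = pvm (y1 :: t1) := by
        simp [pvm, List.foldl_cons]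
      have e2 : (y2 :: t2).foldl min y1 = min y1 (pvm (y2 :: t2)) := by
        simp [pvm, List.foldl_cons, ← pvm_shift]
      have e3 : (y2 :: t2).foldl min y2 = pvm (y2 :: t2) := by
        simp [pvm, List.foldl_cons]
      have e4 : (y1 :: t1).foldl min y2 = min y2 (pvm (y1 :: t1)) := by
        simp [pvm, List.foldl_cons, ← pvm_shift]
      have q1 := List.Perm.foldl_op_eq (op := (min : Int → Int → Int)) (a := y1) h
      have q2 := List.Perm.foldl_op_eq (op := (min : Int → Int → Int)) (a := y2) h.symm
      rw [e1, e2] at q1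
      rw [e3, e4] at q2
      omega
def pvGood : List (Int × Int × Int) → Prop
  | [] => True
  | (v, hi, lo) :: rest => hi = pvM (v :: rest.map (·.1)) ∧ lo = pvm (v :: rest.map (·.1)) ∧ pvGood rest

theorem pvGood_push (x : Int) (st : List (Int × Int × Int)) (h : pvGood st) :
    pvGood (pvPush x st) := by
  cases st with
  | nil => simp [pvPush, pvGood, pvM, pvm]
  | cons e rest =>
    obtain ⟨v, hi, lo⟩ := e
    obtain ⟨hhi, hlo, hrest⟩ := h
    refine ⟨?_, ?_, hhi, hlo, hrest⟩
    · rw [hhi]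
      simp only [pvM, List.map_cons, List.foldl_cons]
      rw [pvM_shift]
      split_ifs <;> omega
    · rw [hlo]
      simp only [pvm, List.map_cons, List.foldl_cons]
      rw [pvm_shift]
      split_ifs <;> omega

theorem pvPush_vals (x : Int) (st : List (Int × Int × Int)) :
    (pvPush x st).map (·.1) = x :: st.map (·.1) := by
  cases st with
  | nil => rfl
  | cons e rest => obtain ⟨v, hi, lo⟩ := e; rfl

theorem pvFlip_vals (back front : List (Int × Int × Int)) :
    (pvFlip back front).map (·.1) = (back.map (·.1)).reverse ++ front.map (·.1) := by
  induction back generalizing front with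
  | nil => simp [pvFlip]
  | cons e rest ih =>
    obtain ⟨v, hi, lo⟩ := e
    simp [pvFlip, ih, pvPush_vals]

theorem pvGood_flip (back front : List (Int × Int × Int)) (h : pvGood front) :
    pvGood (pvFlip back front) := by
  induction back generalizing front with
  | nil => exact h
  | cons e rest ih =>
    obtain ⟨v, hi, lo⟩ := e
    exact ih _ (pvGood_push v front h)

theorem pvGood_tail (st : List (Int × Int × Int)) (h : pvGood st) : pvGood st.tail := by
  cases st with
  | nil => trivial
  | cons e rest => obtain ⟨v, hi, lo⟩ := e; exact h.2.2

theorem pvGood_head_hi (e : Int × Int × Int) (rest : List (Int × Int × Int))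
    (h : pvGood (e :: rest)) : e.2.1 = pvM ((e :: rest).map (·.1)) := by
  obtain ⟨v, hi, lo⟩ := e; exact h.1

theorem pvGood_head_lo (e : Int × Int × Int) (rest : List (Int × Int × Int))
    (h : pvGood (e :: rest)) : e.2.2 = pvm ((e :: rest).map (·.1)) := by
  obtain ⟨v, hi, lo⟩ := e; exact h.2.1
def pvWin (price : List Int) (wn : Nat) (i : Nat) : List Int := (price.take i).drop (i + 1 - wn)
def pvSig (price : List Int) (wn : Nat) (i : Nat) : Int :=
  let x := price.getD i 0
  let win := pvWin price wn i
  if x > pvM win ∧ win ≠ [] then -1 else if x < pvm win ∧ win ≠ [] then 1 else 0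

def pvBodyA (price : List Int) (w : Int) (ans : List Int) (i : Int) : List Int :=
  let a := f1 (PySem.List.slice price (some 0) (some (i + 1))) w
  let a0 := PySem.List.pyGetD a 0 0
  let mm := (PySem.List.pyRange 0 ((a.length : Int) - 1) 1).foldl
    (fun (mm : Int × Int) j =>
      (max mm.1 (PySem.List.pyGetD a j 0), min mm.2 (PySem.List.pyGetD a j 0))) (a0, a0)
  let last := PySem.List.pyGetD a ((a.length : Int) - 1) 0
  if last > mm.1 then ans ++ [-1]
  else if last < mm.2 then ans ++ [1]
  else ans ++ [0]

theorem pvA_step (price : List Int) (w : Int) (wn : Nat) (hw : w = (wn : Int)) (hw1 : 1 ≤ wn)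
    (k : Nat) (hk : k + 1 < price.length) (ans : List Int) :
    pvBodyA price w ans ((1 : Int) + (k : Int)) = ans ++ [pvSig price wn (k + 1)] := by
  have hsl : PySem.List.slice price (some 0) (some ((1:Int) + (k:Int) + 1)) = price.take (k+2) := by
    rw [show (1:Int) + (k:Int) + 1 = ((k+2 : Nat) : Int) by omega]
    rw [PySem.List.slice_zero_start, PySem.List.slice_to_natCast]
  have hlen : (price.take (k+2)).length = k+2 := by simp [List.length_take]; omega
  have ha : f1 (price.take (k+2)) w = (price.take (k+2)).drop (k+2-wn) := by
    unfold f1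
    subst hw
    by_cases hc : ((price.take (k+2)).length : Int) < (wn : Int)
    · rw [if_pos hc]
      rw [hlen] at hc
      have h0 : k+2-wn = 0 := by
        have : k+2 < wn := by exact_mod_cast hc
        omega
      rw [h0, List.drop_zero]
    · rw [if_neg hc]
      rw [hlen] at hc
      have hwle : wn ≤ k+2 := by
        have : (wn:Int) ≤ ((k+2:Nat):Int) := not_lt.mp hc
        exact_mod_cast this
      rw [hlen]
      rw [show ((k+2:Nat):Int) - (wn:Int) = ((k+2-wn : Nat):Int) by omega]
      rw [PySem.List.slice_natCast]
      apply List.take_of_length_le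
      simp [List.length_drop, hlen]
  have htake : price.take (k+2) = price.take (k+1) ++ [price.getD (k+1) 0] := by
    rw [show k+2 = (k+1)+1 from rfl, List.take_add_one]
    rw [List.getElem?_eq_getElem hk]
    simp [List.getD_eq_getElem?_getD, List.getElem?_eq_getElem hk]
  have haW : (price.take (k+2)).drop (k+2-wn)
      = pvWin price wn (k+1) ++ [price.getD (k+1) 0] := by
    rw [htake, List.drop_append_of_le_length (by simp [List.length_take]; omega)]
    unfold pvWin
    congr 2
  set x := price.getD (k+1) 0 with hxdef
  set W := pvWin price wn (k+1) with hWdef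
  simp only [pvBodyA, hsl, ha, haW]
  have hlenW : ((W ++ [x]).length : Int) - 1 = ((W.length : Nat) : Int) := by
    simp
  rw [hlenW]
  have hlast : PySem.List.pyGetD (W ++ [x]) ((W.length : Nat) : Int) 0 = x := by
    rw [PySem.List.pyGetD_natCast]
    simp
  rw [hlast]
  have hfold : (PySem.List.pyRange 0 ((W.length : Nat) : Int) 1).foldl
      (fun (mm : Int × Int) j =>
        (max mm.1 (PySem.List.pyGetD (W ++ [x]) j 0), min mm.2 (PySem.List.pyGetD (W ++ [x]) j 0)))
      (PySem.List.pyGetD (W ++ [x]) 0 0, PySem.List.pyGetD (W ++ [x]) 0 0)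
      = (W.foldl max (PySem.List.pyGetD (W ++ [x]) 0 0),
         W.foldl min (PySem.List.pyGetD (W ++ [x]) 0 0)) := by
    rw [PySem.List.foldl_congr_mem _ _
      (fun (mm : Int × Int) j =>
        (max mm.1 (PySem.List.pyGetD W j 0), min mm.2 (PySem.List.pyGetD W j 0))) _
      (by
        intro acc j hj
        rw [PySem.List.mem_pyRange_one] at hj
        have h1 : PySem.List.pyGetD (W ++ [x]) j 0 = PySem.List.pyGetD W j 0 := by
          rw [PySem.List.pyGetD_eq_getElem _ _ hj.1 (by simp; omega),
              PySem.List.pyGetD_eq_getElem _ _ hj.1 (by omega)]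
          exact List.getElem_append_left (by omega)
        rw [h1])]
    rw [PySem.List.foldl_pyRange_zero_pyGetD' W 0 (fun mm y => (max mm.1 y, min mm.2 y))]
    rw [PySem.List.foldl_prod_mk]
  rw [hfold]
  cases hWc : W with
  | nil =>
    simp only [hWc, List.nil_append, List.foldl_nil, PySem.List.pyGetD_zero_cons]
    simp [pvSig, ← hxdef, ← hWdef, hWc]
  | cons y ys =>
    simp only [hWc, List.cons_append, PySem.List.pyGetD_zero_cons]
    have hM : List.foldl max y (y :: ys) = pvM (y :: ys) := by
      simp [pvM, List.foldl_cons]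
    have hm : List.foldl min y (y :: ys) = pvm (y :: ys) := by
      simp [pvm, List.foldl_cons]
    simp only [hM, hm]
    simp only [pvSig, ← hxdef, ← hWdef, hWc, ne_eq, List.cons_ne_nil, not_false_iff, and_true]
    split_ifs <;> simp
def pvInv (price : List Int) (wn k : Nat) (back front : List (Int × Int × Int)) : Prop :=
  front.map (·.1) ++ (back.map (·.1)).reverse = pvWin price wn k ∧ pvGood back ∧ pvGood front

theorem pvQuery (cur : Int) (W : List Int) (back front : List (Int × Int × Int))
    (hq : front.map (·.1) ++ (back.map (·.1)).reverse = W)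
    (hgb : pvGood back) (hgf : pvGood front) :
    (if back = [] ∧ front = [] then (0 : Int)
     else
       let hl :=
         if back ≠ [] ∧ front ≠ [] then
           (max (back.headD (0,0,0)).2.1 (front.headD (0,0,0)).2.1,
            min (back.headD (0,0,0)).2.2 (front.headD (0,0,0)).2.2)
         else if back ≠ [] then ((back.headD (0,0,0)).2.1, (back.headD (0,0,0)).2.2)
         else ((front.headD (0,0,0)).2.1, (front.headD (0,0,0)).2.2)
       if cur > hl.1 then -1 else if cur < hl.2 then 1 else 0)
    = (if cur > pvM W ∧ W ≠ [] then -1 else if cur < pvm W ∧ W ≠ [] then 1 else 0) := by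
  cases back with
  | nil =>
    cases front with
    | nil =>
      simp at hq
      simp [← hq]
    | cons ef rf =>
      have hW : W = (ef :: rf).map (·.1) := by simpa using hq.symm
      have hWne : W ≠ [] := by simp [hW]
      have hhi := pvGood_head_hi ef rf hgf
      have hlo := pvGood_head_lo ef rf hgf
      simp only [ne_eq, List.cons_ne_nil, not_false_iff, false_and, if_false,
        List.headD_cons, reduceCtorEq, if_neg, and_false, and_true]
      rw [hhi, hlo, ← hW]
      simp [hWne]
  | cons eb rb =>
    have hhib := pvGood_head_hi eb rb hgb
    have hlob := pvGood_head_lo eb rb hgb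
    cases front with
    | nil =>
      have hW : W = ((eb :: rb).map (·.1)).reverse := by simpa using hq.symm
      have hWne : W ≠ [] := by simp [hW]
      have hMW : pvM W = pvM ((eb :: rb).map (·.1)) := by
        rw [hW]; exact pvM_perm _ _ (List.reverse_perm _)
      have hmW : pvm W = pvm ((eb :: rb).map (·.1)) := by
        rw [hW]; exact pvm_perm _ _ (List.reverse_perm _)
      simp only [ne_eq, List.cons_ne_nil, not_false_iff, reduceCtorEq, and_false, false_and,
        if_false, List.headD_cons, and_true, if_true]
      rw [hhib, hlob, ← hMW, ← hmW]
      simp [hWne]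
    | cons ef rf =>
      have hhif := pvGood_head_hi ef rf hgf
      have hlof := pvGood_head_lo ef rf hgf
      have hfne : ((ef :: rf).map (·.1) : List Int) ≠ [] := by simp
      have hbne : (((eb :: rb).map (·.1)).reverse : List Int) ≠ [] := by simp
      have hWne : W ≠ [] := by rw [← hq]; simp
      have hMW : pvM W = max (pvM ((ef :: rf).map (·.1))) (pvM ((eb :: rb).map (·.1))) := by
        rw [← hq, pvM_append _ _ hfne hbne,
          pvM_perm (((eb :: rb).map (·.1)).reverse) _ (List.reverse_perm _)]
      have hmW : pvm W = min (pvm ((ef :: rf).map (·.1))) (pvm ((eb :: rb).map (·.1))) := by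
        rw [← hq, pvm_append _ _ hfne hbne,
          pvm_perm (((eb :: rb).map (·.1)).reverse) _ (List.reverse_perm _)]
      simp only [ne_eq, List.cons_ne_nil, not_false_iff, reduceCtorEq, and_false, false_and,
        if_false, and_self, if_true, List.headD_cons]
      rw [hhib, hlob, hhif, hlof]
      rw [show max (pvM ((eb :: rb).map (·.1))) (pvM ((ef :: rf).map (·.1))) = pvM W by
        rw [hMW]; exact max_comm _ _,
        show min (pvm ((eb :: rb).map (·.1))) (pvm ((ef :: rf).map (·.1))) = pvm W by
        rw [hmW]; exact min_comm _ _]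
      simp [hWne]
theorem pvStep_query (price : List Int) (w : Int) (i : Int) (ans : List Int)
    (back front : List (Int × Int × Int)) (bk fr : List (Int × Int × Int))
    (hbf : (let back := pvPush (PySem.List.pyGetD price (i - 1) 0) back
            if (back.length : Int) + (front.length : Int) > w - 1 then
              let front' := if front = [] then pvFlip back [] else front
              let back' := if front = [] then [] else back
              ((back' : List (Int × Int × Int)), front'.tail)
            else (back, front)) = (bk, fr)) :
    pvStep price w (ans, back, front) i
      = (ans ++ [if bk = [] ∧ fr = [] then (0:Int)
          else
            let hl :=
              if bk ≠ [] ∧ fr ≠ [] then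
                (max (bk.headD (0,0,0)).2.1 (fr.headD (0,0,0)).2.1,
                 min (bk.headD (0,0,0)).2.2 (fr.headD (0,0,0)).2.2)
              else if bk ≠ [] then ((bk.headD (0,0,0)).2.1, (bk.headD (0,0,0)).2.2)
              else ((fr.headD (0,0,0)).2.1, (fr.headD (0,0,0)).2.2)
            if PySem.List.pyGetD price i 0 > hl.1 then -1
            else if PySem.List.pyGetD price i 0 < hl.2 then 1 else 0], bk, fr) := by
  simp only [pvStep, hbf]
  split_ifs <;> rfl
theorem pvStep_query' (price : List Int) (w : Int) (i : Int) (ans : List Int)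
    (back front : List (Int × Int × Int)) (bk fr : List (Int × Int × Int))
    (hbf : (if ((pvPush (PySem.List.pyGetD price (i - 1) 0) back).length : Int)
              + (front.length : Int) > w - 1 then
             ((if front = [] then [] else pvPush (PySem.List.pyGetD price (i - 1) 0) back),
              (if front = [] then pvFlip (pvPush (PySem.List.pyGetD price (i - 1) 0) back) []
               else front).tail)
           else (pvPush (PySem.List.pyGetD price (i - 1) 0) back, front)) = (bk, fr)) :
    pvStep price w (ans, back, front) i
      = (ans ++ [if bk = [] ∧ fr = [] then (0:Int)
          else
            let hl :=
              if bk ≠ [] ∧ fr ≠ [] then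
                (max (bk.headD (0,0,0)).2.1 (fr.headD (0,0,0)).2.1,
                 min (bk.headD (0,0,0)).2.2 (fr.headD (0,0,0)).2.2)
              else if bk ≠ [] then ((bk.headD (0,0,0)).2.1, (bk.headD (0,0,0)).2.2)
              else ((fr.headD (0,0,0)).2.1, (fr.headD (0,0,0)).2.2)
            if PySem.List.pyGetD price i 0 > hl.1 then -1
            else if PySem.List.pyGetD price i 0 < hl.2 then 1 else 0], bk, fr) :=
  pvStep_query price w i ans back front bk fr hbf

theorem pvB_step (price : List Int) (w : Int) (wn : Nat) (hw : w = (wn : Int)) (hw1 : 1 ≤ wn)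
    (k : Nat) (hk : k + 1 < price.length) (ans : List Int)
    (back front : List (Int × Int × Int)) (hinv : pvInv price wn k back front) :
    ∃ back' front', pvStep price w (ans, back, front) ((1 : Int) + (k : Int))
        = (ans ++ [pvSig price wn (k + 1)], back', front')
      ∧ pvInv price wn (k + 1) back' front' := by
  obtain ⟨hq, hgb, hgf⟩ := hinv
  have hx : PySem.List.pyGetD price ((1:Int) + (k:Int) - 1) 0 = price.getD k 0 := by
    rw [show (1:Int) + (k:Int) - 1 = ((k:Nat):Int) by omega, PySem.List.pyGetD_natCast]
  have hcur : PySem.List.pyGetD price ((1:Int) + (k:Int)) 0 = price.getD (k+1) 0 := by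
    rw [show (1:Int) + (k:Int) = ((k+1:Nat):Int) by omega, PySem.List.pyGetD_natCast]
  have hgb1 : pvGood (pvPush (price.getD k 0) back) := pvGood_push _ back hgb
  have hvb1 : (pvPush (price.getD k 0) back).map (·.1) = price.getD k 0 :: back.map (·.1) :=
    pvPush_vals _ back
  have htake : price.take (k+1) = price.take k ++ [price.getD k 0] := by
    rw [List.take_add_one, List.getElem?_eq_getElem (show k < price.length by omega)]
    simp [List.getD_eq_getElem?_getD, List.getElem?_eq_getElem (show k < price.length by omega)]
  have hmid : front.map (·.1) ++ ((pvPush (price.getD k 0) back).map (·.1)).reverse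
      = (price.take (k+1)).drop (k+1-wn) := by
    rw [hvb1, List.reverse_cons, ← List.append_assoc, hq, htake,
      List.drop_append_of_le_length (by simp [List.length_take]; omega)]
    rfl
  have hlen := congrArg List.length hmid
  simp only [List.length_append, List.length_map, List.length_reverse, List.length_drop,
    List.length_take] at hlen
  by_cases hfull : wn ≤ k + 1
  · -- the window is full: one element is popped
    have hcond : (((pvPush (price.getD k 0) back).length : Int) + (front.length : Int) > w - 1) := by
      have h1 : (pvPush (price.getD k 0) back).length = back.length + 1 := by
        have := congrArg List.length hvb1; simpa using this
      rw [hw]; omega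
    have hwin2 : pvWin price wn (k+1) = ((price.take (k+1)).drop (k+1-wn)).tail := by
      unfold pvWin
      rw [List.tail_drop]
      congr 1
      omega
    by_cases hfc : front = []
    · -- flip then pop
      have hq2 : ((pvFlip (pvPush (price.getD k 0) back) []).tail).map (·.1)
          ++ (([] : List (Int × Int × Int)).map (·.1)).reverse = pvWin price wn (k+1) := by
        rw [List.map_tail, pvFlip_vals]
        have hmid' : ((pvPush (price.getD k 0) back).map (·.1)).reverse
            = (price.take (k+1)).drop (k+1-wn) := by simpa [hfc] using hmid
        rw [hwin2, ← hmid']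
        simp
      refine ⟨[], (pvFlip (pvPush (price.getD k 0) back) []).tail, ?_, hq2,
        trivial, pvGood_tail _ (pvGood_flip _ [] trivial)⟩
      rw [pvStep_query' price w _ ans back front [] (pvFlip (pvPush (price.getD k 0) back) []).tail
        (by rw [hx, if_pos hcond, if_pos hfc, if_pos hfc])]
      rw [hcur]
      rw [pvQuery (price.getD (k+1) 0) (pvWin price wn (k+1)) []
        ((pvFlip (pvPush (price.getD k 0) back) []).tail) hq2 trivial
        (pvGood_tail _ (pvGood_flip _ [] trivial))]
      rfl
    · -- pop from the existing front
      have hq2 : (front.tail).map (·.1)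
          ++ ((pvPush (price.getD k 0) back).map (·.1)).reverse = pvWin price wn (k+1) := by
        obtain ⟨ef, rf, rfl⟩ := List.exists_cons_of_ne_nil hfc
        have h := congrArg List.tail hmid
        simp only [List.map_cons, List.cons_append, List.tail_cons] at h
        rw [hwin2, ← h]
        simp
      refine ⟨pvPush (price.getD k 0) back, front.tail, ?_, hq2, hgb1, pvGood_tail _ hgf⟩
      rw [pvStep_query' price w _ ans back front (pvPush (price.getD k 0) back) front.tail
        (by rw [hx, if_pos hcond, if_neg hfc, if_neg hfc])]
      rw [hcur]
      rw [pvQuery (price.getD (k+1) 0) (pvWin price wn (k+1)) (pvPush (price.getD k 0) back)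
        front.tail hq2 hgb1 (pvGood_tail _ hgf)]
      rfl
  · -- window not yet full: no pop
    have hcond : ¬ (((pvPush (price.getD k 0) back).length : Int) + (front.length : Int) > w - 1) := by
      have h1 : (pvPush (price.getD k 0) back).length = back.length + 1 := by
        have := congrArg List.length hvb1; simpa using this
      rw [hw]
      push_neg
      omega
    have hwin1 : pvWin price wn (k+1) = (price.take (k+1)).drop (k+1-wn) := by
      unfold pvWin
      congr 1
      omega
    have hq1 : front.map (·.1) ++ ((pvPush (price.getD k 0) back).map (·.1)).reverse
        = pvWin price wn (k+1) := by rw [hmid, hwin1]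
    refine ⟨pvPush (price.getD k 0) back, front, ?_, hq1, hgb1, hgf⟩
    rw [pvStep_query' price w _ ans back front (pvPush (price.getD k 0) back) front
      (by rw [hx, if_neg hcond])]
    rw [hcur]
    congr 2
    rw [pvQuery (price.getD (k+1) 0) (pvWin price wn (k+1)) (pvPush (price.getD k 0) back)
      front hq1 hgb1 hgf]
    rfl
theorem pv_fold (price : List Int) (w : Int) (wn : Nat) (hw : w = (wn : Int)) (hw1 : 1 ≤ wn) :
    ∀ n, n = 0 ∨ n + 1 ≤ price.length →
    ∃ A back front,
      (List.range n).foldl (fun ans k => pvBodyA price w ans ((1:Int) + (k:Nat))) [0] = A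
      ∧ (List.range n).foldl (fun st k => pvStep price w st ((1:Int) + (k:Nat))) ([0], [], [])
          = (A, back, front)
      ∧ pvInv price wn n back front := by
  intro n
  induction n with
  | zero =>
    intro _
    exact ⟨[0], [], [], rfl, rfl, by simp [pvWin], trivial, trivial⟩
  | succ n ih =>
    intro hn
    have hk : n + 1 < price.length := by omega
    obtain ⟨A, back, front, hA, hB, hinv⟩ := ih (by omega)
    obtain ⟨back', front', heq, hinv'⟩ :=
      pvB_step price w wn hw hw1 n hk A back front hinv
    refine ⟨A ++ [pvSig price wn (n + 1)], back', front', ?_, ?_, hinv'⟩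
    · rw [List.range_succ, List.foldl_append, hA, List.foldl_cons, List.foldl_nil]
      exact pvA_step price w wn hw hw1 n hk A
    · rw [List.range_succ, List.foldl_append, hB, List.foldl_cons, List.foldl_nil]
      exact heq

theorem pv_main (price : List Int) (w : Int) (wn : Nat) (hw : w = (wn : Int)) (hw1 : 1 ≤ wn) :
    turtle price w = turtle_alt price w := by
  have hr : PySem.List.pyRange 1 (price.length : Int) 1
      = (List.range (price.length - 1)).map (fun k => (1:Int) + (k:Nat)) := by
    rw [PySem.List.pyRange_one,
      show ((price.length : Int) - 1).toNat = price.length - 1 by omega]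
  obtain ⟨A, back, front, hA, hB, _⟩ :=
    pv_fold price w wn hw hw1 (price.length - 1) (by omega)
  have h1 : turtle price w = A := by
    show (PySem.List.pyRange 1 (price.length : Int) 1).foldl (pvBodyA price w) [0] = A
    rw [hr, List.foldl_map]
    exact hA
  have h2 : turtle_alt price w = A := by
    unfold turtle_alt
    rw [hr, List.foldl_map, hB]
  rw [h1, h2]

theorem pv_trivial (price : List Int) (w : Int) (h : price.length ≤ 1) :
    turtle price w = turtle_alt price w := by
  have hnil : PySem.List.pyRange 1 (price.length : Int) 1 = [] :=
    PySem.List.pyRange_one_eq_nil (by omega)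
  show (PySem.List.pyRange 1 (price.length : Int) 1).foldl (pvBodyA price w) [0]
    = ((PySem.List.pyRange 1 (price.length : Int) 1).foldl (pvStep price w) ([0], [], [])).1
  rw [hnil]
  rfl

-- ===== VERDICT (by name: the statement is the Claim_ definition above) =====
theorem turtle_spec : Claim_equal_turtle := by
  intro price w _ hpre
  unfold Spec_turtle
  rcases hpre with h | h
  · exact pv_trivial price w h
  · exact pv_main price w w.toNat (by omega) (by omega)

theorem turtle_raises : Claim_raises_turtle := by
  unfold Claim_raises_turtle
  constructor
  · intro price w _ hr
    unfold Raises_turtle at hr; unfold Pre_turtle; omega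
  · exact ⟨by decide, by decide, by decide⟩
-- self-check: B's value at the raise witness, read off the proof of turtle_raises
theorem pvRaiseWitnessOut_ok :
    turtle_alt pvRaiseWitness_turtle.1 pvRaiseWitness_turtle.2 = pvRaiseWitnessOut_turtle := by
  have h := turtle_raises
  unfold Claim_raises_turtle at h
  exact h.2.2.2
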